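-- pv_equiv track=rewrite | github.com/sm171190/problems | beyblade.py | maxWins
-- ===== SOURCE A (Python) =====
-- def maxWins(N,MyTeam,Opponents):
-- 	MyTeam.sort()
-- 	MyPowers = MyTeam[::-1]
-- 	Opponents.sort()
-- 	TheirPowers = Opponents[::-1]
-- 	count = 0
-- 	lastPos = -1
-- 	for i in range(N):
-- 		j=lastPos+1
-- 		myCurrentTeammatePower = MyPowers[i]
-- 		while j<N:
-- 			if TheirPowers[j]<myCurrentTeammatePower:
-- 				count +=1
-- 				lastPos = j
-- 				break
-- 			j+=1
--
-- 	return count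
-- ===== SOURCE B (Python) =====
-- def maxWins(N, MyTeam, Opponents):
--     MyTeam.sort()
--     Opponents.sort()
--     mine = MyTeam[::-1]
--     theirs = Opponents[::-1]
--     count = 0
--     i = 0
--     j = 0
--     while i < N and j < N:
--         if theirs[j] < mine[i]:
--             count += 1
--             i += 1
--         j += 1
--     return count
-- ===== Notes on version B (the rewrite author's own statement) =====
-- stated objective: alternative
-- what changed: Replaced the per-teammate inner rescanning while-loop (restarting from lastPos+1 for every i) with a single two-pointer pass over both descending-sorted arrays, so each opponent is inspected at most once.
import Mathlib
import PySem

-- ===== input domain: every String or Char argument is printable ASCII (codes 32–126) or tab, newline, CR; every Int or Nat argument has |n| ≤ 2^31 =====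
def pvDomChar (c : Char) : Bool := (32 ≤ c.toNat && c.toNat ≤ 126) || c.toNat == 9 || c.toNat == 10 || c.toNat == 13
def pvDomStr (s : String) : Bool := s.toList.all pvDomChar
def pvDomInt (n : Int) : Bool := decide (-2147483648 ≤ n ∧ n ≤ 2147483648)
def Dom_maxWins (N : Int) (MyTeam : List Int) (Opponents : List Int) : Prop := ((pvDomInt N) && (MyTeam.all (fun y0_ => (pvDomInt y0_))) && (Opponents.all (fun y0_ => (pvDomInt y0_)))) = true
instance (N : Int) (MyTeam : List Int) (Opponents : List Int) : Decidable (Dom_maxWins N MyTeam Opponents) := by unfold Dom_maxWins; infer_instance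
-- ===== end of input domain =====

-- B replaces A's per-teammate rescanning inner while-loop with a single two-pointer pass
-- over both descending-sorted arrays (objective: alternative). Both A and B sort the two
-- list arguments in place in Python; the theorems below are about the RETURN value only
-- (the in-place mutation is identical in A and B).

-- ===== PORT A =====
-- xs[::-1] (both Pythons use it)
def pyRev (xs : List Int) : List Int := (PySem.List.slice? xs none none (-1)).getD []

-- the inner 'while j < N' of A: some (some j) = break at j, some none = fell through, none = IndexError
def pvAinner (theirs : List Int) (N p j : Int) : Option (Option Int) :=
  if _h : j < N then
    match PySem.List.pyGet? theirs j with
    | none => none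
    | some t => if t < p then some (some j) else pvAinner theirs N p (j + 1)
  else some none
termination_by (N - j).toNat
decreasing_by simp_wf; omega

-- the outer 'for i in range(N)' of A, state (count, lastPos); none = IndexError
def pvAouter (mine theirs : List Int) (N : Int) : List Int → Int → Int → Option Int
  | [], count, _ => some count
  | i :: rest, count, lastPos =>
    match PySem.List.pyGet? mine i with
    | none => none
    | some p =>
      match pvAinner theirs N p (lastPos + 1) with
      | none => none
      | some none => pvAouter mine theirs N rest count lastPos
      | some (some j) => pvAouter mine theirs N rest (count + 1) j

def maxWins (N : Int) (MyTeam : List Int) (Opponents : List Int) : Int :=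
  let MyPowers := pyRev (PySem.List.sorted MyTeam (fun x => x) false)
  let TheirPowers := pyRev (PySem.List.sorted Opponents (fun x => x) false)
  (pvAouter MyPowers TheirPowers N (PySem.List.pyRange 0 N 1) 0 (-1)).getD 0

-- ===== PORT B =====
-- B's single two-pointer 'while i < N and j < N'; none = IndexError
def pvBloop (mine theirs : List Int) (N count i j : Int) : Option Int :=
  if _h : i < N ∧ j < N then
    match PySem.List.pyGet? theirs j, PySem.List.pyGet? mine i with
    | some t, some p =>
      if t < p then pvBloop mine theirs N (count + 1) (i + 1) (j + 1)
      else pvBloop mine theirs N count i (j + 1)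
    | _, _ => none
  else some count
termination_by (N - j).toNat
decreasing_by all_goals simp_wf; omega

def maxWins_alt (N : Int) (MyTeam : List Int) (Opponents : List Int) : Int :=
  let mine := pyRev (PySem.List.sorted MyTeam (fun x => x) false)
  let theirs := pyRev (PySem.List.sorted Opponents (fun x => x) false)
  (pvBloop mine theirs N 0 0 0).getD 0

-- ===== PRECONDITION & SPEC =====
-- Pre_ excludes exactly the inputs where A raises IndexError: N larger than one of the
-- team sizes (then MyPowers[i] or TheirPowers[j] is hit out of range). N ≤ 0 is inside.
def Pre_maxWins (N : Int) (MyTeam : List Int) (Opponents : List Int) : Prop :=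
  N ≤ (MyTeam.length : Int) ∧ N ≤ (Opponents.length : Int)
instance (N : Int) (MyTeam : List Int) (Opponents : List Int) : Decidable (Pre_maxWins N MyTeam Opponents) := by unfold Pre_maxWins; infer_instance

def pvWitness_maxWins : Int × List Int × List Int := (2, [1, 3], [2, 2])

def Spec_maxWins (N : Int) (MyTeam : List Int) (Opponents : List Int) (out : Int) : Prop := out = maxWins_alt N MyTeam Opponents
instance (N : Int) (MyTeam : List Int) (Opponents : List Int) (out : Int) : Decidable (Spec_maxWins N MyTeam Opponents out) := by unfold Spec_maxWins; infer_instance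

-- ===== CLAIM (what is proved, stated in full; the proofs are below) =====
def Claim_equal_maxWins : Prop := ∀ (N : Int) (MyTeam : List Int) (Opponents : List Int), Dom_maxWins N MyTeam Opponents → Pre_maxWins N MyTeam Opponents → Spec_maxWins N MyTeam Opponents (maxWins N MyTeam Opponents)

-- ===== LEMMAS AND PROOFS =====

-- step lemmas for B's loop
lemma pvBloop_stop (mine theirs : List Int) (N count i j : Int) (h : ¬ (i < N ∧ j < N)) :
    pvBloop mine theirs N count i j = some count := by
  rw [pvBloop]; simp [h]

lemma pvBloop_win (mine theirs : List Int) (N count i j t p : Int)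
    (hi : i < N) (hj : j < N)
    (ht : PySem.List.pyGet? theirs j = some t) (hp : PySem.List.pyGet? mine i = some p)
    (hc : t < p) :
    pvBloop mine theirs N count i j = pvBloop mine theirs N (count + 1) (i + 1) (j + 1) := by
  rw [pvBloop]; simp [hi, hj, ht, hp, hc]

lemma pvBloop_lose (mine theirs : List Int) (N count i j t p : Int)
    (hi : i < N) (hj : j < N)
    (ht : PySem.List.pyGet? theirs j = some t) (hp : PySem.List.pyGet? mine i = some p)
    (hc : ¬ t < p) :
    pvBloop mine theirs N count i j = pvBloop mine theirs N count i (j + 1) := by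
  rw [pvBloop]; simp [hi, hj, ht, hp, hc]

-- one failing comparison step of A's inner scan
lemma pvAinner_skip (theirs : List Int) (N p t j : Int)
    (hj : j < N) (hg : PySem.List.pyGet? theirs j = some t) (hle : p ≤ t) :
    pvAinner theirs N p j = pvAinner theirs N p (j + 1) := by
  rw [pvAinner]
  simp [hj, hg, show ¬ t < p by omega]

-- advancing lastPos past an opponent every remaining teammate loses to changes nothing
lemma pvAouter_skip (mine theirs : List Int) (N t j : Int)
    (hj : j < N) (hg : PySem.List.pyGet? theirs j = some t) :
    ∀ (is : List Int) (count : Int),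
      (∀ i ∈ is, ∃ p, PySem.List.pyGet? mine i = some p ∧ p ≤ t) →
      pvAouter mine theirs N is count (j - 1) = pvAouter mine theirs N is count j := by
  intro is
  induction is with
  | nil => intro count _; rfl
  | cons i rest ih =>
    intro count hall
    obtain ⟨p, hp, hpt⟩ := hall i (by simp)
    have h1 : pvAinner theirs N p (j - 1 + 1) = pvAinner theirs N p (j + 1) := by
      rw [show j - 1 + 1 = j by omega]
      exact pvAinner_skip theirs N p t j hj hg hpt
    simp only [pvAouter, hp, h1]
    cases hres : pvAinner theirs N p (j + 1) with
    | none => rfl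
    | some r =>
      cases r with
      | none => exact ih count (fun i hi => hall i (by simp [hi]))
      | some k => rfl

-- once lastPos + 1 = N every remaining inner scan fails immediately
lemma pvAouter_done (mine theirs : List Int) (N : Int) :
    ∀ (is : List Int) (count : Int),
      (∀ i ∈ is, ∃ p, PySem.List.pyGet? mine i = some p) →
      pvAouter mine theirs N is count (N - 1) = some count := by
  intro is
  induction is with
  | nil => intro count _; rfl
  | cons i rest ih =>
    intro count hall
    obtain ⟨p, hp⟩ := hall i (by simp)
    have h1 : pvAinner theirs N p (N - 1 + 1) = some none := by
      rw [pvAinner]; simp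
    simp only [pvAouter, hp, h1]
    exact ih count (fun i hi => hall i (by simp [hi]))

-- main invariant: A's loop from (count, lastPos = j - 1) over range(i, N) equals B's loop at (count, i, j)
lemma pv_main (mine theirs : List Int) (N : Int)
    (hmine : ∀ k : Int, 0 ≤ k → k < N → ∃ p, PySem.List.pyGet? mine k = some p)
    (htheirs : ∀ k : Int, 0 ≤ k → k < N → ∃ t, PySem.List.pyGet? theirs k = some t)
    (hanti : ∀ k k' : Int, 0 ≤ k → k ≤ k' → k' < N →
        ∀ p p', PySem.List.pyGet? mine k = some p → PySem.List.pyGet? mine k' = some p' → p' ≤ p) :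
    ∀ (n : Nat) (count i j : Int), (N - j).toNat ≤ n → 0 ≤ i → 0 ≤ j → j ≤ N →
      pvAouter mine theirs N (PySem.List.pyRange i N 1) count (j - 1) =
      pvBloop mine theirs N count i j := by
  intro n
  induction n with
  | zero =>
    intro count i j hn hi hj hjN
    rw [pvBloop_stop mine theirs N count i j (by omega), show j - 1 = N - 1 by omega]
    exact pvAouter_done mine theirs N _ count
      (fun k hk => hmine k (by have := (PySem.List.mem_pyRange_one.mp hk); omega)
        (PySem.List.mem_pyRange_one.mp hk).2)
  | succ n ih =>
    intro count i j hn hi hj hjN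
    by_cases hiN : i < N
    · by_cases hjltN : j < N
      · obtain ⟨t, ht⟩ := htheirs j hj hjltN
        obtain ⟨p, hp⟩ := hmine i hi hiN
        by_cases hcmp : t < p
        · -- win: A breaks at j, B advances both pointers
          have hinner : pvAinner theirs N p (j - 1 + 1) = some (some j) := by
            rw [show j - 1 + 1 = j by omega, pvAinner]
            simp [hjltN, ht, hcmp]
          rw [PySem.List.pyRange_one_cons hiN]
          simp only [pvAouter, hp, hinner]
          have hIH := ih (count + 1) (i + 1) (j + 1) (by omega) (by omega) (by omega) (by omega)
          rw [show (j : Int) + 1 - 1 = j by omega] at hIH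
          rw [hIH, pvBloop_win mine theirs N count i j t p hiN hjltN ht hp hcmp]
        · -- loss: both skip opponent j
          have hall : ∀ k ∈ PySem.List.pyRange i N 1,
              ∃ p', PySem.List.pyGet? mine k = some p' ∧ p' ≤ t := by
            intro k hk
            obtain ⟨h1, h2⟩ := PySem.List.mem_pyRange_one.mp hk
            obtain ⟨p', hp'⟩ := hmine k (by omega) h2
            exact ⟨p', hp', le_trans (hanti i k hi h1 h2 p p' hp hp') (by omega)⟩
          have hskip := pvAouter_skip mine theirs N t j hjltN ht
            (PySem.List.pyRange i N 1) count hall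
          have hIH := ih count i (j + 1) (by omega) hi (by omega) (by omega)
          rw [show (j : Int) + 1 - 1 = j by omega] at hIH
          rw [hskip, hIH, pvBloop_lose mine theirs N count i j t p hiN hjltN ht hp hcmp]
      · rw [pvBloop_stop mine theirs N count i j (by omega), show j - 1 = N - 1 by omega]
        exact pvAouter_done mine theirs N _ count
          (fun k hk => hmine k (by have := (PySem.List.mem_pyRange_one.mp hk); omega)
            (PySem.List.mem_pyRange_one.mp hk).2)
    · rw [PySem.List.pyRange_one_eq_nil (by omega),
        pvBloop_stop mine theirs N count i j (by omega)]
      rfl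

-- [::-1] is reverse
lemma pyRev_eq (xs : List Int) : pyRev xs = xs.reverse := by
  unfold pyRev; rw [PySem.List.slice?_none_none_neg_one]; rfl

-- indexing the reversed sorted list succeeds below N ≤ len
lemma pv_hget (xs : List Int) (N k : Int) (hN : N ≤ (xs.length : Int)) (h0 : 0 ≤ k) (hk : k < N) :
    ∃ p, PySem.List.pyGet? ((PySem.List.sorted xs (fun x => x) false).reverse) k = some p := by
  refine ⟨_, PySem.List.pyGet?_eq_some_getElem _ h0 ?_⟩
  simp only [List.length_reverse, PySem.List.length_sorted]
  omega

-- the reversed sorted list is antitone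
lemma pv_hanti (xs : List Int) (N : Int) (hN : N ≤ (xs.length : Int)) :
    ∀ k k' : Int, 0 ≤ k → k ≤ k' → k' < N →
      ∀ p p', PySem.List.pyGet? ((PySem.List.sorted xs (fun x => x) false).reverse) k = some p →
        PySem.List.pyGet? ((PySem.List.sorted xs (fun x => x) false).reverse) k' = some p' → p' ≤ p := by
  intro k k' h0 hkk' hk' p p' hp hp'
  have hlen : ((PySem.List.sorted xs (fun x => x) false).reverse.length : Int) = (xs.length : Int) := by
    simp only [List.length_reverse, PySem.List.length_sorted]
  rw [PySem.List.pyGet?_eq_some_getElem _ h0 (by omega)] at hp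
  rw [PySem.List.pyGet?_eq_some_getElem _ (by omega) (by omega)] at hp'
  injection hp with hp
  injection hp' with hp'
  subst hp hp'
  rw [List.getElem_reverse, List.getElem_reverse]
  have hl : (PySem.List.sorted xs (fun x => x) false).length = xs.length :=
    PySem.List.length_sorted xs (fun x => x) false
  exact PySem.List.sorted_id_getElem_mono _ (by omega) (by omega)

-- ===== VERDICT (by name: the statement is the Claim_ definition above) =====
theorem maxWins_spec : Claim_equal_maxWins := by
  intro N MyTeam Opponents _hdom hpre
  obtain ⟨hm, ho⟩ := hpre
  simp only [Spec_maxWins, maxWins, maxWins_alt, pyRev_eq]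
  by_cases hN : 0 < N
  · have key := pv_main ((PySem.List.sorted MyTeam (fun x => x) false).reverse)
      ((PySem.List.sorted Opponents (fun x => x) false).reverse) N
      (fun k h0 hk => pv_hget MyTeam N k hm h0 hk)
      (fun k h0 hk => pv_hget Opponents N k ho h0 hk)
      (pv_hanti MyTeam N hm)
      N.toNat 0 0 0 (by omega) (by omega) (by omega) (by omega)
    rw [show (0 : Int) - 1 = -1 by rfl] at key
    rw [key]
  · rw [PySem.List.pyRange_one_eq_nil (by omega), pvBloop_stop _ _ _ _ _ _ (by omega)]
    rfl
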